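-- pv_equiv track=rewrite | github.com/nbratek/WDI | zestaw 3/zad16.py | check
-- ===== SOURCE A (Python) =====
-- from math import inf
--
-- def check(T):
--     n = len(T)
--     licznik_najmniejszej = 0
--     licznik_najwiekszej = 0
--     najmniejsza = inf
--     najwieksza = - inf
--     for i in range(n):
--         if T[i] < najmniejsza:
--             najmniejsza = T[i]
--         if T[i] > najwieksza:
--             najwieksza = T[i]
--     for i in range(n):
--         if T[i] == najmniejsza:
--             licznik_najmniejszej += 1
--         if T[i] == najwieksza:
--             licznik_najwiekszej += 1
--     if licznik_najmniejszej == 1 and licznik_najwiekszej == 1: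
--         return True
--     else:
--         return False
-- ===== SOURCE B (Python) =====
-- from math import inf
--
-- def check(T):
--     najmniejsza = inf
--     najwieksza = -inf
--     cmin = 0
--     cmax = 0
--     for x in T:
--         if x < najmniejsza:
--             najmniejsza = x
--             cmin = 1
--         elif x == najmniejsza:
--             cmin += 1
--         if x > najwieksza:
--             najwieksza = x
--             cmax = 1
--         elif x == najwieksza:
--             cmax += 1
--     return cmin == 1 and cmax == 1
-- ===== Notes on version B (the rewrite author's own statement) =====
-- stated objective: alternative
-- what changed: B makes one pass maintaining the running min/max together with occurrence counters that reset to 1 whenever a new extremum is found, instead of A's two separate full scans (one to find min/max, one to count them).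
import Mathlib
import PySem

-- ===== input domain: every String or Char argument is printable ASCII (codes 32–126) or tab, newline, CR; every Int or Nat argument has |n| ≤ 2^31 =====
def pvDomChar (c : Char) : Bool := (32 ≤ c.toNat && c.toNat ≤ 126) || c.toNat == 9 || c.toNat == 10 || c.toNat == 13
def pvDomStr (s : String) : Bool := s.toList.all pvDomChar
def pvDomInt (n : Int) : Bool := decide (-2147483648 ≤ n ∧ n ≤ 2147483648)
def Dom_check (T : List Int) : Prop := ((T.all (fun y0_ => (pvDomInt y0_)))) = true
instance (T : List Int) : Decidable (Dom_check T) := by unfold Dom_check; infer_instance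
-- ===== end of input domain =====

-- B replaces A's two full scans by one pass whose counters reset to 1 at each new extremum.

-- ===== PORT A =====
-- first loop: update running min/max; `none` models the float inf / -inf sentinel
-- (an Int is always < inf and > -inf, and never == either, exactly as in Python)
def stepA (p : Option Int × Option Int) (x : Int) : Option Int × Option Int :=
  (match p.1 with
   | none => some x
   | some m => if x < m then some x else some m,
   match p.2 with
   | none => some x
   | some M => if x > M then some x else some M)

-- second loop: count occurrences of the found min/max
def cstepA (mn mx : Option Int) (c : Int × Int) (x : Int) : Int × Int :=
  (if some x = mn then c.1 + 1 else c.1,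
   if some x = mx then c.2 + 1 else c.2)

def check (T : List Int) : Bool :=
  let s1 := T.foldl stepA (none, none)
  let s2 := T.foldl (cstepA s1.1 s1.2) (0, 0)
  if s2.1 = 1 ∧ s2.2 = 1 then true else false

-- ===== PORT B =====
-- single pass: state (min, cmin, max, cmax); a counter resets to 1 on a new extremum
def stepB (s : Option Int × Int × Option Int × Int) (x : Int) : Option Int × Int × Option Int × Int :=
  let mnc : Option Int × Int :=
    match s.1 with
    | none => (some x, 1)
    | some m => if x < m then (some x, 1) else if x = m then (some m, s.2.1 + 1) else (some m, s.2.1)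
  let mxc : Option Int × Int :=
    match s.2.2.1 with
    | none => (some x, 1)
    | some M => if x > M then (some x, 1) else if x = M then (some M, s.2.2.2 + 1) else (some M, s.2.2.2)
  (mnc.1, mnc.2, mxc.1, mxc.2)

def check_alt (T : List Int) : Bool :=
  let r := T.foldl stepB (none, 0, none, 0)
  r.2.1 == 1 && r.2.2.2 == 1

-- ===== PRECONDITION & SPEC =====
def Spec_check (T : List Int) (out : Bool) : Prop := out = check_alt T
instance (T : List Int) (out : Bool) : Decidable (Spec_check T out) := by unfold Spec_check; infer_instance

-- ===== CLAIM (what is proved, stated in full; the proofs are below) =====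
def Claim_equal_check : Prop := ∀ (T : List Int), Dom_check T → Spec_check T (check T)

-- ===== LEMMAS AND PROOFS =====

lemma foldl_min_le : ∀ (T : List Int) (m : Int), T.foldl min m ≤ m := by
  intro T
  induction T with
  | nil => intro m; simp
  | cons a T ih =>
      intro m
      calc (a :: T).foldl min m = T.foldl min (min m a) := by simp [List.foldl]
        _ ≤ min m a := ih _
        _ ≤ m := min_le_left _ _

lemma foldl_max_ge : ∀ (T : List Int) (m : Int), m ≤ T.foldl max m := by
  intro T
  induction T with
  | nil => intro m; simp
  | cons a T ih =>
      intro m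
      calc m ≤ max m a := le_max_left _ _
        _ ≤ T.foldl max (max m a) := ih _
        _ = (a :: T).foldl max m := by simp [List.foldl]

lemma foldA_eq : ∀ (T : List Int) (m M : Int),
    T.foldl stepA (some m, some M) = (some (T.foldl min m), some (T.foldl max M)) := by
  intro T
  induction T with
  | nil => intro m M; simp
  | cons a T ih =>
      intro m M
      have h1 : (if a < m then some a else some m) = some (min m a) := by
        split_ifs <;> simp only [Option.some.injEq] <;> omega
      have h2 : (if a > M then some a else some M) = some (max M a) := by
        split_ifs <;> simp only [Option.some.injEq] <;> omega
      simp only [List.foldl, stepA, h1, h2]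
      exact ih _ _

lemma foldC_eq : ∀ (T : List Int) (m M c d : Int),
    T.foldl (cstepA (some m) (some M)) (c, d)
      = (c + (T.count m : Int), d + (T.count M : Int)) := by
  intro T
  induction T with
  | nil => intro m M c d; simp
  | cons a T ih =>
      intro m M c d
      simp only [List.foldl, cstepA, List.count_cons, Option.some.injEq]
      rw [ih]
      simp only [Prod.mk.injEq, beq_iff_eq]
      refine ⟨?_, ?_⟩ <;> (push_cast; split_ifs <;> omega)

lemma foldB_eq : ∀ (T : List Int) (m c M d : Int),
    T.foldl stepB (some m, c, some M, d)
      = (some (T.foldl min m),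
         (if T.foldl min m = m then c else 0) + (T.count (T.foldl min m) : Int),
         some (T.foldl max M),
         (if T.foldl max M = M then d else 0) + (T.count (T.foldl max M) : Int)) := by
  intro T
  induction T with
  | nil => intro m c M d; simp
  | cons a T ih =>
      intro m c M d
      have hstep : stepB (some m, c, some M, d) a =
          (some (min m a), if a < m then 1 else if a = m then c + 1 else c,
           some (max M a), if M < a then 1 else if a = M then d + 1 else d) := by
        have hmin : min m a = (if a < m then a else m) := by
          rw [min_def]; split_ifs <;> omega
        have hmax : max M a = (if M < a then a else M) := by
          rw [max_def]; split_ifs <;> omega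
        simp only [stepB, hmin, hmax]
        split_ifs <;> rfl
      have hmn : T.foldl min (min m a) ≤ min m a := foldl_min_le T _
      have hmx : max M a ≤ T.foldl max (max M a) := foldl_max_ge T _
      have e1 := min_le_left m a
      have e2 := min_le_right m a
      have e3 := le_max_left M a
      have e4 := le_max_right M a
      simp only [List.foldl, hstep, ih, List.count_cons, beq_iff_eq, Prod.mk.injEq]
      refine ⟨trivial, ?_, trivial, ?_⟩ <;> (push_cast; split_ifs <;> omega)

lemma ite_and_eq_beq (x y u v : Int) (hx : x = u) (hy : y = v) :
    (if x = 1 ∧ y = 1 then true else false) = (u == 1 && v == 1) := by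
  subst hx; subst hy
  by_cases h1 : x = 1 <;> by_cases h2 : y = 1 <;> simp [h1, h2]

-- ===== VERDICT (by name: the statement is the Claim_ definition above) =====
theorem check_spec : Claim_equal_check := by
  intro T _
  unfold Spec_check
  cases T with
  | nil => rfl
  | cons a T =>
      show check (a :: T) = check_alt (a :: T)
      unfold check check_alt
      have hA : stepA (none, none) a = (some a, some a) := rfl
      have hB : stepB (none, 0, none, 0) a = (some a, 1, some a, 1) := rfl
      have hc : cstepA (some (T.foldl min a)) (some (T.foldl max a)) (0, 0) a
          = ((if a = T.foldl min a then (1:Int) else 0), (if a = T.foldl max a then (1:Int) else 0)) := by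
        simp [cstepA]
      have hmn := foldl_min_le T a
      have hmx := foldl_max_ge T a
      simp only [List.foldl, hA, hB, foldA_eq, foldB_eq, hc, foldC_eq]
      apply ite_and_eq_beq <;> (split_ifs <;> omega)
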